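-- pv_equiv track=rewrite | github.com/robertlee2k/SkillRL | scripts/analyze_actual_prompts.py | simulate_dialogue_history
-- ===== SOURCE A (Python) =====
-- from typing import Dict, List, Any
--
-- def simulate_dialogue_history(playbook: Dict[str, Any], max_steps: int = 20) -> List[str]:
--     """
--     模拟对话历史累积
--
--     返回每一步可能的对话历史文本长度
--     """
--     nodes = playbook.get('nodes', {})
--     history_lengths = []
--
--     # 模拟每一步的对话历史
--     # 假设每步增加: "买家: {buyer_text}" (~100-500 chars) + "客服: [Action: skill_id]" (~50 chars)
--     dialogue_chars = 0
--
--     for step in range(max_steps):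
--         # 模拟对话历史增长
--         # 平均每个 turn: 买家消息 ~200 chars, 客服动作标记 ~50 chars
--         dialogue_chars += 200 + 50  # buyer turn + agent turn
--
--         history_lengths.append(dialogue_chars)
--
--     return history_lengths
-- ===== SOURCE B (Python) =====
-- from typing import Dict, List, Any
--
-- def simulate_dialogue_history(playbook: Dict[str, Any], max_steps: int = 20) -> List[str]:
--     nodes = playbook.get('nodes', {})
--     # closed form: step i contributes a cumulative total of 250 * (i + 1) chars
--     return [250 * (i + 1) for i in range(max_steps)]
-- ===== Notes on version B (the rewrite author's own statement) =====
-- stated objective: simpler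
-- what changed: Replaced the loop that threads a running dialogue_chars accumulator and appends to a list with a closed-form comprehension computing each element 250*(i+1) directly from its index.
import Mathlib
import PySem

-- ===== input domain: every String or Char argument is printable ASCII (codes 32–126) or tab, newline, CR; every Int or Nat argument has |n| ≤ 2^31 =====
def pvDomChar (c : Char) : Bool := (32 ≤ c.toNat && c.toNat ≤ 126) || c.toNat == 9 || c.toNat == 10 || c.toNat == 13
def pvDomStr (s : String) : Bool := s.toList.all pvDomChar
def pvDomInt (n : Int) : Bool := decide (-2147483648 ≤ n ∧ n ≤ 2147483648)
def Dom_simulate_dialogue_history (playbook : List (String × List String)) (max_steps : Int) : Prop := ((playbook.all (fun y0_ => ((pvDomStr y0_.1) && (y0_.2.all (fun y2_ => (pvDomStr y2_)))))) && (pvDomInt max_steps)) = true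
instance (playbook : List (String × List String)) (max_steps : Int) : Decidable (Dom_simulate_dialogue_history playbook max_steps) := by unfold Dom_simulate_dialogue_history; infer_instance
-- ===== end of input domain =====

-- B replaces A's running-accumulator loop with a closed-form per-index formula (simpler).

-- ===== PORT A =====
def simulate_dialogue_history (playbook : List (String × List String)) (max_steps : Int) : List Int :=
  let _nodes := PySem.Dict.getD (PySem.Dict.mk playbook) "nodes" ([] : List String)
  let r := (PySem.List.pyRange 0 max_steps 1).foldl
    (fun (s : Int × List Int) _ => (s.1 + (200 + 50), s.2 ++ [s.1 + (200 + 50)]))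
    ((0 : Int), ([] : List Int))
  r.2

-- ===== PORT B =====
def simulate_dialogue_history_alt (playbook : List (String × List String)) (max_steps : Int) : List Int :=
  let _nodes := PySem.Dict.getD (PySem.Dict.mk playbook) "nodes" ([] : List String)
  (PySem.List.pyRange 0 max_steps 1).map (fun i => 250 * (i + 1))

-- ===== PRECONDITION & SPEC =====
def Spec_simulate_dialogue_history (playbook : List (String × List String)) (max_steps : Int) (out : List Int) : Prop := out = simulate_dialogue_history_alt playbook max_steps
instance (playbook : List (String × List String)) (max_steps : Int) (out : List Int) : Decidable (Spec_simulate_dialogue_history playbook max_steps out) := by unfold Spec_simulate_dialogue_history; infer_instance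

-- ===== CLAIM (what is proved, stated in full; the proofs are below) =====
def Claim_equal_simulate_dialogue_history : Prop := ∀ (playbook : List (String × List String)) (max_steps : Int), Dom_simulate_dialogue_history playbook max_steps → Spec_simulate_dialogue_history playbook max_steps (simulate_dialogue_history playbook max_steps)

-- ===== LEMMAS AND PROOFS =====

/-- The suffix of values A's fold appends, starting from running total `c`. -/
def pvTail (c : Int) : Nat -> List Int
  | 0 => []
  | n+1 => (c + 250) :: pvTail (c + 250) n

theorem pv_fold_tail (l : List Int) : forall (c : Int) (h : List Int),
    (l.foldl (fun (s : Int × List Int) _ => (s.1 + (200 + 50), s.2 ++ [s.1 + (200 + 50)])) (c, h)).2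
      = h ++ pvTail c l.length := by
  induction l with
  | nil => intro c h; simp [pvTail]
  | cons x l ih =>
    intro c h
    simp only [List.foldl_cons, List.length_cons, ih, pvTail]
    rw [List.append_assoc]
    norm_num [pvTail]

theorem pvTail_eq (n : Nat) : forall (c : Int),
    pvTail c n = (List.range n).map (fun (k : Nat) => c + 250 * ((k : Int) + 1)) := by
  induction n with
  | zero => intro c; simp [pvTail]
  | succ m ih =>
    intro c
    rw [List.range_succ_eq_map, List.map_cons, List.map_map]
    simp only [pvTail, ih]
    refine List.cons_eq_cons.mpr ⟨by push_cast; ring, ?_⟩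
    apply List.map_congr_left
    intro k _
    simp only [Function.comp_apply]
    push_cast
    ring

-- ===== VERDICT (by name: the statement is the Claim_ definition above) =====
theorem simulate_dialogue_history_spec : Claim_equal_simulate_dialogue_history := by
  intro playbook max_steps _
  show simulate_dialogue_history playbook max_steps = simulate_dialogue_history_alt playbook max_steps
  unfold simulate_dialogue_history simulate_dialogue_history_alt
  simp only [pv_fold_tail, pvTail_eq, List.nil_append, PySem.List.pyRange_one,
    List.length_map, List.length_range, List.map_map]
  apply List.map_congr_left
  intro k _
  simp only [Function.comp]
  ring
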